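-- pv_equiv track=rewrite | github.com/wooriel/baekjoon | silver_V/4402_soundex.py | get_sound
-- ===== SOURCE A (Python) =====
-- def get_sound(_str):
--     soundex = []
--     prev = '-1'
--     for i in range(len(_str)):
--         num = '0'
--         if _str[i] in {'B', 'F', 'P', 'V'}:
--             num = '1'
--         elif _str[i] in {'C', 'G', 'J', 'K', 'Q', 'S', 'X', 'Z'}:
--             num = '2'
--         elif _str[i] in {'D', 'T'}:
--             num = '3'
--         elif _str[i] == 'L':
--             num = '4'
--         elif _str[i] in {'M', 'N'}:
--             num = '5'
--         elif _str[i] == 'R':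
--             num = '6'
--         # else:
--         #     continue
--         if prev == -1 or (prev != num and num != '0'):
--             soundex.append(num)
--         prev = num
--     ans = ''.join(soundex)
--     return ans
-- ===== SOURCE B (Python) =====
-- DIGIT = {'B': '1', 'F': '1', 'P': '1', 'V': '1',
--          'C': '2', 'G': '2', 'J': '2', 'K': '2',
--          'Q': '2', 'S': '2', 'X': '2', 'Z': '2',
--          'D': '3', 'T': '3', 'L': '4', 'M': '5',
--          'N': '5', 'R': '6'}
--
--
-- def get_sound(_str):
--     # Stage 1: translate the whole string into its digit string.
--     digs = ''.join(DIGIT.get(c, '0') for c in _str)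
--     # Stage 2: two-pointer scan over maximal runs of equal digits;
--     # each run contributes its digit once, unless it is '0'.
--     out = []
--     i, n = 0, len(digs)
--     while i < n:
--         d = digs[i]
--         if d != '0':
--             out.append(d)
--         j = i + 1
--         while j < n and digs[j] == d:
--             j += 1
--         i = j
--     return ''.join(out)
-- ===== Notes on version B (the rewrite author's own statement) =====
-- stated objective: alternative
-- what changed: Replaces A's single character-by-character pass with a prev state variable by two separate stages: first translate the whole string into a digit string via a dict, then a two-pointer scan that detects each maximal run of equal digits with an inner while and emits its digit once, dropping the zero digit.
import Mathlib
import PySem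

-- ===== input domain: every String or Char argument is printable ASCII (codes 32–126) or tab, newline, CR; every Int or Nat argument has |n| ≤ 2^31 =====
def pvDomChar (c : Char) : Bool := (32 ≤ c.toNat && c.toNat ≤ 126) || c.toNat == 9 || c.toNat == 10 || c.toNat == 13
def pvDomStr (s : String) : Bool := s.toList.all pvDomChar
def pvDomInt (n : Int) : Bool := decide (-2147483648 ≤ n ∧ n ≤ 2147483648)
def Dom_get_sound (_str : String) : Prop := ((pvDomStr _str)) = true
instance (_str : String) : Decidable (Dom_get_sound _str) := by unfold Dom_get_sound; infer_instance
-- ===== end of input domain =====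

-- B replaces A's single stateful prev-tracking pass by two stages: build the whole digit
-- string first, then a two-pointer scan over maximal runs of equal digits (objective: alternative).

-- ===== PORT A =====
-- A's if/elif chain computing num for one character
def numA (c : Char) : String :=
  if c == 'B' || c == 'F' || c == 'P' || c == 'V' then "1"
  else if c == 'C' || c == 'G' || c == 'J' || c == 'K' || c == 'Q' || c == 'S' || c == 'X' || c == 'Z' then "2"
  else if c == 'D' || c == 'T' then "3"
  else if c == 'L' then "4"
  else if c == 'M' || c == 'N' then "5"
  else if c == 'R' then "6"
  else "0"

-- one iteration of A's loop; Python's `prev == -1` compares a str with an int and is always False, so only the second disjunct remains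
def stepA (st : List String × String) (c : Char) : List String × String :=
  let num := numA c
  let soundex := if st.2 ≠ num ∧ num ≠ "0" then st.1 ++ [num] else st.1
  (soundex, num)

def get_sound (_str : String) : String :=
  String.join (_str.toList.foldl stepA ([], "-1")).1

-- ===== PORT B =====
def pvDIGIT : PySem.Dict Char Char :=
  PySem.Dict.mk [('B', '1'), ('F', '1'), ('P', '1'), ('V', '1'),
   ('C', '2'), ('G', '2'), ('J', '2'), ('K', '2'),
   ('Q', '2'), ('S', '2'), ('X', '2'), ('Z', '2'),
   ('D', '3'), ('T', '3'), ('L', '4'), ('M', '5'),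
   ('N', '5'), ('R', '6')]

-- DIGIT.get(c, '0')  (Python 1-char strings ported as Char)
def digB (c : Char) : Char := PySem.Dict.getD pvDIGIT c '0'

-- inner while: j advances past the run of digits equal to d
def skipB (digs : List Char) (d : Char) (j : Nat) : Nat :=
  if j < digs.length ∧ digs[j]! = d then skipB digs d (j + 1) else j
termination_by digs.length - j
decreasing_by omega

theorem skipB_ge (digs : List Char) (d : Char) (j : Nat) : j ≤ skipB digs d j := by
  unfold skipB
  split
  · exact le_trans (Nat.le_succ j) (skipB_ge digs d (j + 1))
  · exact le_refl j
termination_by digs.length - j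
decreasing_by
  rename_i h; omega

-- outer while: run scan with two pointers i (run start) and skipB … (run end)
def scanB (digs : List Char) (i : Nat) (out : List String) : List String :=
  if h : i < digs.length then
    let d := digs[i]!
    let out' := if d ≠ '0' then out ++ [String.singleton d] else out
    scanB digs (skipB digs d (i + 1)) out'
  else out
termination_by digs.length - i
decreasing_by
  have := skipB_ge digs digs[i]! (i + 1); omega

def get_sound_alt (_str : String) : String :=
  let digs := _str.toList.map digB
  String.join (scanB digs 0 [])

-- ===== PRECONDITION & SPEC =====
def Spec_get_sound (_str : String) (out : String) : Prop := out = get_sound_alt _str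
instance (_str : String) (out : String) : Decidable (Spec_get_sound _str out) := by unfold Spec_get_sound; infer_instance

-- ===== CLAIM (what is proved, stated in full; the proofs are below) =====
def Claim_equal_get_sound : Prop := ∀ (_str : String), Dom_get_sound _str → Spec_get_sound _str (get_sound _str)

-- ===== LEMMAS AND PROOFS =====

-- l[i]! = l[i] when in range (proof helper)
lemma getBang_eq {α : Type} [Inhabited α] (l : List α) (i : Nat) (h : i < l.length) :
    l[i]! = l[i] := by
  simp [List.getElem!_eq_getElem?_getD, List.getElem?_eq_getElem h]

-- the common value: collapse maximal runs of equal digits, keep the nonzero representatives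
def collapse : List Char → List String
  | [] => []
  | d :: rest =>
      (if d ≠ '0' then [String.singleton d] else []) ++ collapse (rest.dropWhile (· == d))
termination_by l => l.length
decreasing_by
  have := List.length_dropWhile_le (· == d) rest
  simp; omega

-- the A-side recursion
def runS (prev : String) : List Char → List String
  | [] => []
  | c :: cs =>
      (if prev ≠ numA c ∧ numA c ≠ "0" then [numA c] else []) ++ runS (numA c) cs

lemma foldlA (cs : List Char) : ∀ (acc : List String) (prev : String),
    (cs.foldl stepA (acc, prev)).1 = acc ++ runS prev cs := by
  induction cs with
  | nil => intro acc prev; simp [runS]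
  | cons c cs ih =>
      intro acc prev
      simp only [List.foldl_cons, stepA, runS]
      split_ifs with h
      · rw [ih]; simp
      · rw [ih]; simp

lemma numA_sing (c : Char) : numA c = String.singleton (digB c) := by
  by_cases h : c ∈ ['B','F','P','V','C','G','J','K','Q','S','X','Z','D','T','L','M','N','R']
  · fin_cases h <;> decide
  · simp only [List.mem_cons, List.not_mem_nil, or_false, not_or] at h
    have h0 : digB c = '0' := by
      unfold digB
      rw [PySem.Dict.getD_of_not_contains]
      simp_all [pvDIGIT, @eq_comm Char]
    rw [h0]
    unfold numA; split_ifs <;> simp_all <;> decide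

lemma sing_inj (a b : Char) : String.singleton a = String.singleton b ↔ a = b := by
  constructor
  · intro h
    have : (String.singleton a).toList = (String.singleton b).toList := by rw [h]
    simpa using this
  · intro h; rw [h]

lemma numA_ne_neg1 (c : Char) : numA c ≠ "-1" := by
  unfold numA; split_ifs <;> decide

lemma numA_eq_zero_iff (c : Char) : numA c = "0" ↔ digB c = '0' := by
  rw [numA_sing]
  have := sing_inj (digB c) '0'
  constructor
  · intro h; exact (sing_inj _ _).1 h
  · intro h; rw [h]; rfl

-- A's recursion after the first step equals collapse of the digit tail with the current run removed
lemma runS_eq (cs : List Char) : ∀ (d : Char),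
    runS (String.singleton d) cs = collapse ((cs.map digB).dropWhile (· == d)) := by
  induction cs with
  | nil => intro d; simp [runS, collapse]
  | cons c cs ih =>
      intro d
      by_cases hd : digB c = d
      · have hb : (digB c == d) = true := by simp [hd]
        simp only [runS, List.map_cons, List.dropWhile_cons, hb, if_pos]
        rw [numA_sing, hd, if_neg (by simp), List.nil_append]
        exact ih d
      · have hb : (digB c == d) = false := by simp [hd]
        simp only [runS, List.map_cons, List.dropWhile_cons, hb, Bool.false_eq_true, if_false,
          collapse]
        rw [numA_sing, ih (digB c)]
        congr 1
        by_cases h0 : digB c = '0'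
        · rw [if_neg ?_, if_neg (by simp [h0])]
          rw [h0]
          simp [show String.singleton '0' = "0" from by decide]
        · rw [if_pos ?_, if_pos (by simp [h0])]
          refine ⟨?_, ?_⟩
          · rw [(sing_inj d (digB c)).ne]; exact fun e => hd e.symm
          · rw [show ("0" : String) = String.singleton '0' from by decide,
              (sing_inj (digB c) '0').ne]
            exact h0

lemma runS_init (cs : List Char) : runS "-1" cs = collapse (cs.map digB) := by
  cases cs with
  | nil => simp [runS, collapse]
  | cons c cs =>
      simp only [runS, List.map_cons, collapse]
      congr 1
      · by_cases h0 : numA c = "0"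
        · rw [if_neg (by simp [h0]), if_neg (by simp [(numA_eq_zero_iff c).1 h0])]
        · rw [if_pos ⟨fun e => numA_ne_neg1 c e.symm, h0⟩,
            if_pos (by intro e; exact h0 ((numA_eq_zero_iff c).2 e)), numA_sing]
      · rw [numA_sing, runS_eq]

-- the inner while is dropWhile
lemma skipB_drop (digs : List Char) (d : Char) : ∀ (j : Nat),
    digs.drop (skipB digs d j) = (digs.drop j).dropWhile (· == d) := by
  intro j
  unfold skipB
  split
  · rename_i h
    rw [skipB_drop digs d (j + 1), List.drop_eq_getElem_cons h.1, List.dropWhile_cons]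
    rw [← getBang_eq digs j h.1, h.2]
    simp
  · rename_i h
    by_cases hj : j < digs.length
    · have h2 : (digs[j] == d) = false := by
        have : digs[j]! ≠ d := fun e => h ⟨hj, e⟩
        rw [getBang_eq digs j hj] at this
        simp [this]
      rw [List.drop_eq_getElem_cons hj, List.dropWhile_cons, h2]
      simp
    · have e : digs.drop j = ([] : List Char) := List.drop_eq_nil_of_le (by omega)
      rw [e]
      rfl
termination_by j => digs.length - j
decreasing_by rename_i h; omega

-- the outer while computes collapse of the remaining suffix
lemma scanB_eq (digs : List Char) : ∀ (i : Nat) (out : List String),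
    scanB digs i out = out ++ collapse (digs.drop i) := by
  intro i
  unfold scanB
  split
  · rename_i h
    intro out
    rw [scanB_eq digs (skipB digs digs[i]! (i + 1)), skipB_drop]
    rw [show digs.drop i = digs[i]! :: digs.drop (i + 1) from by
      rw [getBang_eq digs i h]; exact List.drop_eq_getElem_cons h]
    simp only [collapse]
    split_ifs with h0
    · simp
    · simp
  · rename_i h
    intro out
    rw [List.drop_eq_nil_of_le (by omega)]
    simp [collapse]
termination_by i => digs.length - i
decreasing_by have := skipB_ge digs digs[i]! (i + 1); omega

-- ===== VERDICT (by name: the statement is the Claim_ definition above) =====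
theorem get_sound_spec : Claim_equal_get_sound := by
  intro s _
  simp only [Spec_get_sound, get_sound, get_sound_alt]
  rw [foldlA, scanB_eq, runS_init]
  simp
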